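-- pv_equiv track=rewrite | github.com/google-research/google-research | yobo/internal/colmap_utils.py | _sliding_window_pairs
-- ===== SOURCE A (Python) =====
-- def _sliding_window_pairs(
--     filenames, window_size
-- ):
--   """Computes all unique pairs in a sliding window of a given size."""
--   pairs = set()
--   window = filenames[:window_size]
--   pairs = pairs.union(_all_pairs(window))
--   for elem in filenames[window_size:]:
--     window = window[1:] + [elem]
--     pairs = pairs.union(_all_pairs(window))
--   return list(sorted(pairs))
--
-- def _all_pairs(filenames):
--   """Computes all unique pairs of filenames."""
--   pairs = []
--   n = len(filenames)
--   for i in range(n):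
--     for j in range(i + 1, n):
--       pairs.append((filenames[i], filenames[j]))
--   return pairs
-- ===== SOURCE B (Python) =====
-- def _sliding_window_pairs(filenames, window_size):
--   """Computes all unique pairs in a sliding window of a given size.
--
--   One pass: as the window slides, only the pairs ending at the newly
--   entered element are added (each pair exactly once), instead of
--   regenerating every window's full pair list.
--   """
--   pairs = set()
--   n = len(filenames)
--   for j in range(n):
--     for i in range(max(0, j - window_size + 1), j):
--       pairs.add((filenames[i], filenames[j]))
--   return sorted(pairs)
-- ===== Notes on version B (the rewrite author's own statement) =====
-- stated objective: faster
-- what changed: Instead of regenerating and unioning every window's full all-pairs list, B makes one pass over the list and adds, for each position j, only the pairs (filenames[i], filenames[j]) with max(0, j-window_size+1) <= i < j, i.e. only the pairs the sliding window newly creates.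
-- intended difference: For negative window_size with len(filenames) >= 2 - window_size, A returns the sorted pairs of a sliding window of size len(filenames)+window_size (an artefact of Python's negative slicing); B returns [], the intended value, since a non-positive window contains no pair. — e.g. on _sliding_window_pairs(["a", "b", "c"], -1): A returns [("a", "b"), ("b", "c")], B returns []
import Mathlib
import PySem

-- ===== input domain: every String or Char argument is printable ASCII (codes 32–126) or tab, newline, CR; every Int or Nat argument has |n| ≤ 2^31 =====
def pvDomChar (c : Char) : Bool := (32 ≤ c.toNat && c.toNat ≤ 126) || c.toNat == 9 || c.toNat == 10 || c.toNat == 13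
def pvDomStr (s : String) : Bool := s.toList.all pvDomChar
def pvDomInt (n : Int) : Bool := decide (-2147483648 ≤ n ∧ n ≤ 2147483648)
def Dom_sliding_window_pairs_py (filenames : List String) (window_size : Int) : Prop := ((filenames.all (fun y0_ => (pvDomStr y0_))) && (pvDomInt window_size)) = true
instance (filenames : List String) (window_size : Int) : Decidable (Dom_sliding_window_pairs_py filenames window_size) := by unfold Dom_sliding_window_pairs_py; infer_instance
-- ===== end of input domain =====

-- B replaces A's regenerate-all-pairs-per-window loop by a single pass that adds,
-- for each element, only the pairs ending at it; return value only, no argument is mutated.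


-- ===== PORT A =====
-- _all_pairs: nested index loops appending (filenames[i], filenames[j])
def pvAllPairs (filenames : List String) : List (String × String) :=
  let n : Int := filenames.length
  (PySem.List.pyRange 0 n).foldl (fun pairs i =>
    (PySem.List.pyRange (i + 1) n).foldl (fun pairs j =>
      pairs ++ [(PySem.List.pyGetD filenames i "", PySem.List.pyGetD filenames j "")]) pairs) []

-- loop body of A: window = window[1:] + [elem]; pairs = pairs.union(_all_pairs(window))
def pvStepA (st : PySem.Set (String × String) × List String) (elem : String) :
    PySem.Set (String × String) × List String :=
  let window := PySem.List.slice st.2 (some 1) none ++ [elem]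
  (PySem.Set.union st.1 (pvAllPairs window), window)

def sliding_window_pairs_py (filenames : List String) (window_size : Int) : List (String × String) :=
  let pairs : PySem.Set (String × String) := PySem.Set.empty
  let window := PySem.List.slice filenames none (some window_size)
  let pairs := PySem.Set.union pairs (pvAllPairs window)
  let res := (PySem.List.slice filenames (some window_size) none).foldl pvStepA (pairs, window)
  PySem.List.sorted2 res.1 Prod.fst Prod.snd

-- ===== PORT B =====
def sliding_window_pairs_py_alt (filenames : List String) (window_size : Int) : List (String × String) :=
  let n : Int := filenames.length
  let pairs := (PySem.List.pyRange 0 n).foldl (fun pairs j =>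
    (PySem.List.pyRange (max 0 (j - window_size + 1)) j).foldl
      (fun (pairs : PySem.Set (String × String)) i =>
        PySem.Set.add pairs (PySem.List.pyGetD filenames i "", PySem.List.pyGetD filenames j ""))
      pairs) PySem.Set.empty
  PySem.List.sorted2 pairs Prod.fst Prod.snd

-- ===== PRECONDITION & SPEC =====
-- On negative window_size with at least 2 + window_size elements, A returns the sorted pairs of
-- a sliding window of size len(filenames)+window_size (an artefact of Python's negative slicing);
-- B returns [], the intended value, since a non-positive window contains no pair.
def D_sliding_window_pairs_py (filenames : List String) (window_size : Int) : Prop :=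
  window_size < 0 ∧ 2 ≤ (filenames.length : Int) + window_size
instance (filenames : List String) (window_size : Int) : Decidable (D_sliding_window_pairs_py filenames window_size) := by unfold D_sliding_window_pairs_py; infer_instance

def Spec_sliding_window_pairs_py (filenames : List String) (window_size : Int) (out : List (String × String)) : Prop := ¬ D_sliding_window_pairs_py filenames window_size → out = sliding_window_pairs_py_alt filenames window_size
instance (filenames : List String) (window_size : Int) (out : List (String × String)) : Decidable (Spec_sliding_window_pairs_py filenames window_size out) := by unfold Spec_sliding_window_pairs_py; infer_instance

def pvDiffWitness_sliding_window_pairs_py : List String × Int := (["a", "b", "c"], -1)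
def pvDiffWitnessOut_sliding_window_pairs_py : (List (String × String)) × (List (String × String)) :=
  ([("a", "b"), ("b", "c")], [])

-- ===== CLAIM (what is proved, stated in full; the proofs are below) =====
def Claim_unchanged_sliding_window_pairs_py : Prop := ∀ (filenames : List String) (window_size : Int), Dom_sliding_window_pairs_py filenames window_size → Spec_sliding_window_pairs_py filenames window_size (sliding_window_pairs_py filenames window_size)
def Claim_changed_sliding_window_pairs_py : Prop := Dom_sliding_window_pairs_py (pvDiffWitness_sliding_window_pairs_py.1) (pvDiffWitness_sliding_window_pairs_py.2) ∧ D_sliding_window_pairs_py (pvDiffWitness_sliding_window_pairs_py.1) (pvDiffWitness_sliding_window_pairs_py.2) ∧ sliding_window_pairs_py (pvDiffWitness_sliding_window_pairs_py.1) (pvDiffWitness_sliding_window_pairs_py.2) = pvDiffWitnessOut_sliding_window_pairs_py.1 ∧ sliding_window_pairs_py_alt (pvDiffWitness_sliding_window_pairs_py.1) (pvDiffWitness_sliding_window_pairs_py.2) = pvDiffWitnessOut_sliding_window_pairs_py.2 ∧ pvDiffWitnessOut_sliding_window_pairs_py.1 ≠ pvDiffWitnessOut_sliding_window_pairs_py.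2
def Claim_exact_sliding_window_pairs_py : Prop := ∀ (filenames : List String) (window_size : Int), Dom_sliding_window_pairs_py filenames window_size → D_sliding_window_pairs_py filenames window_size → sliding_window_pairs_py filenames window_size ≠ sliding_window_pairs_py_alt filenames window_size

-- ===== LEMMAS AND PROOFS =====

-- the pair set both programs compute: positions i < j, less than window_size apart
def pvGood (f : List String) (w : Int) (p : String × String) : Prop :=
  ∃ i j : Nat, i < j ∧ j < f.length ∧ (j : Int) < (i : Int) + w ∧
    p = (f.getD i "", f.getD j "")

-- the successive windows A's loop goes through
def pvWins (win : List String) : List String → List (List String)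
  | [] => []
  | e :: rest => (win.tail ++ [e]) :: pvWins (win.tail ++ [e]) rest

-- Python's tuple sort is the sort by the lexicographic key
theorem pv_sorted2_eq_sorted {α κ₁ κ₂ : Type} [LinearOrder κ₁] [LinearOrder κ₂]
    (xs : List α) (k1 : α → κ₁) (k2 : α → κ₂) :
    PySem.List.sorted2 xs k1 k2 = PySem.List.sorted xs (fun x => toLex (k1 x, k2 x)) := by
  have hb : (fun a b : α => decide (k1 a < k1 b) || (!decide (k1 b < k1 a) && decide (k2 a < k2 b)))
      = (fun a b : α => decide ((fun x => toLex (k1 x, k2 x)) a < (fun x => toLex (k1 x, k2 x)) b)) := by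
    funext a b
    simp only [Prod.Lex.toLex_lt_toLex]
    rcases lt_trichotomy (k1 a) (k1 b) with h | h | h
    · simp [h, not_lt.mpr (le_of_lt h)]
    · simp [h]
    · simp [not_lt.mpr (le_of_lt h), h, ne_of_gt h]
  unfold PySem.List.sorted2 PySem.List.sorted
  simp only [Bool.false_eq_true, if_false]
  rw [hb]

theorem pv_mem_allPairs (xs : List String) (p : String × String) :
    p ∈ pvAllPairs xs ↔ ∃ i j : Nat, i < j ∧ j < xs.length ∧
      p = (xs.getD i "", xs.getD j "") := by
  unfold pvAllPairs
  simp only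
  rw [show (fun (pairs : List (String × String)) (i : Int) =>
        (PySem.List.pyRange (i + 1) (xs.length : Int)).foldl (fun pairs j =>
          pairs ++ [(PySem.List.pyGetD xs i "", PySem.List.pyGetD xs j "")]) pairs)
      = (fun pairs i => pairs ++ (PySem.List.pyRange (i + 1) (xs.length : Int)).map
          (fun j => (PySem.List.pyGetD xs i "", PySem.List.pyGetD xs j ""))) from
    funext fun pairs => funext fun i => PySem.List.foldl_append_singleton_eq_map ..]
  rw [PySem.List.foldl_append_eq_flatMap]
  simp only [List.nil_append, List.mem_flatMap, List.mem_map, PySem.List.mem_pyRange_one]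
  constructor
  · rintro ⟨i, ⟨hi0, hin⟩, j, ⟨hj1, hjn⟩, rfl⟩
    refine ⟨i.toNat, j.toNat, by omega, by omega, ?_⟩
    rw [show i = (i.toNat : Int) by omega, show j = (j.toNat : Int) by omega,
      PySem.List.pyGetD_natCast, PySem.List.pyGetD_natCast]
    constructor
  · rintro ⟨i, j, hij, hjn, rfl⟩
    exact ⟨(i : Int), by omega, (j : Int), by omega,
      by rw [PySem.List.pyGetD_natCast, PySem.List.pyGetD_natCast]⟩

theorem pv_nodup_loopA (rest : List String) (s : PySem.Set (String × String))
    (win : List String) (hs : s.Nodup) : ((rest.foldl pvStepA (s, win)).1).Nodup := by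
  induction rest generalizing s win with
  | nil => exact hs
  | cons e rest ih => exact ih _ _ (PySem.Set.nodup_union _ _ hs)

theorem pv_mem_loopA (rest : List String) (s : PySem.Set (String × String))
    (win : List String) (p : String × String) :
    p ∈ (rest.foldl pvStepA (s, win)).1 ↔
      p ∈ s ∨ ∃ w ∈ pvWins win rest, p ∈ pvAllPairs w := by
  induction rest generalizing s win with
  | nil => simp [pvWins]
  | cons e rest ih =>
    simp only [List.foldl_cons, pvStepA, PySem.List.slice_from_one, pvWins]
    rw [ih]
    simp [PySem.Set.mem_union]
    tauto

theorem pv_window_step (f : List String) (wn t : Nat) (h1 : 1 ≤ wn) (h2 : wn + t < f.length) :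
    ((f.drop t).take wn).tail ++ [f[wn + t]'h2] = (f.drop (t + 1)).take wn := by
  rw [← List.drop_one, List.drop_take, List.drop_one, List.tail_drop]
  conv_rhs => rw [show wn = (wn - 1) + 1 by omega, List.take_add_one]
  congr 1
  rw [List.getElem?_drop, List.getElem?_eq_getElem (by omega)]
  simp only [Option.toList_some, List.cons.injEq, and_true]
  exact getElem_congr rfl (by omega) (by omega)

theorem pvWins_char (f : List String) (wn : Nat) (h1 : 1 ≤ wn) :
    ∀ (rest : List String) (t : Nat), f.drop (wn + t) = rest →
      ∀ W, (W ∈ pvWins ((f.drop t).take wn) rest ↔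
        ∃ u, t < u ∧ u + wn ≤ f.length ∧ W = (f.drop u).take wn) := by
  intro rest
  induction rest with
  | nil =>
    intro t ht W
    have hn : f.length ≤ wn + t := List.drop_eq_nil_iff.mp ht
    simp only [pvWins, List.not_mem_nil, false_iff]
    rintro ⟨u, hu1, hu2, _⟩; omega
  | cons e rest ih =>
    intro t ht W
    have hlen : wn + t < f.length := by
      by_contra h
      rw [List.drop_eq_nil_of_le (by omega)] at ht; simp at ht
    have hct := List.drop_eq_getElem_cons (l := f) (i := wn + t) hlen
    rw [ht] at hct
    injection hct with he hrest
    subst he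
    have hrest2 : f.drop (wn + (t + 1)) = rest := by
      rw [show wn + (t+1) = wn + t + 1 by omega]; exact hrest.symm
    simp only [pvWins, List.mem_cons, pv_window_step f wn t h1 hlen, ih (t+1) hrest2 W]
    constructor
    · rintro (rfl | ⟨u, hu1, hu2, rfl⟩)
      · exact ⟨t + 1, by omega, by omega, rfl⟩
      · exact ⟨u, by omega, hu2, rfl⟩
    · rintro ⟨u, hu1, hu2, rfl⟩
      rcases Nat.eq_or_lt_of_le hu1 with h | h
      · exact Or.inl (by rw [← h])
      · exact Or.inr ⟨u, by omega, hu2, rfl⟩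

theorem pvWins_len (win : List String) (rest : List String) (W : List String)
    (h : W ∈ pvWins win rest) : W.length ≤ max 1 win.length := by
  induction rest generalizing win with
  | nil => simp [pvWins] at h
  | cons e rest ih =>
    simp only [pvWins, List.mem_cons] at h
    rcases h with rfl | h
    · simp; omega
    · have := ih _ h
      simp at this ⊢
      omega

theorem pv_getD_window (f : List String) (u k wn : Nat) (hk : k < wn) (hk2 : u + k < f.length) :
    ((f.drop u).take wn).getD k "" = f.getD (u + k) "" := by
  rw [List.getD_eq_getElem _ _ (by simp; omega), List.getD_eq_getElem _ _ (by omega)]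
  rw [List.getElem_take, List.getElem_drop]

theorem pv_len_window (f : List String) (u wn : Nat) :
    ((f.drop u).take wn).length = min wn (f.length - u) := by simp

theorem pv_memA (f : List String) (w : Int) (hw : 0 ≤ w) (p : String × String) :
    p ∈ ((PySem.List.slice f (some w) none).foldl pvStepA
      (PySem.Set.union PySem.Set.empty (pvAllPairs (PySem.List.slice f none (some w))),
       PySem.List.slice f none (some w))).1 ↔ pvGood f w p := by
  rw [PySem.List.slice_from f hw, PySem.List.slice_to f hw, pv_mem_loopA]
  set wn := w.toNat with hwn
  have hwi : (wn : Int) = w := Int.toNat_of_nonneg hw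
  simp only [PySem.Set.mem_union, PySem.Set.empty_eq, List.not_mem_nil, false_or]
  rcases Nat.eq_zero_or_pos wn with h0 | h1
  · rw [h0]
    constructor
    · rintro (h | ⟨W, hW, hp⟩)
      · rw [pv_mem_allPairs] at h
        obtain ⟨i, j, hij, hj, _⟩ := h
        simp at hj
      · rw [pv_mem_allPairs] at hp
        obtain ⟨i, j, hij, hj, _⟩ := hp
        have := pvWins_len _ _ _ hW
        simp at this
        omega
    · rintro ⟨i, j, hij, hjn, hlt, _⟩
      omega
  · by_cases hn : f.length ≤ wn
    · rw [List.drop_eq_nil_of_le hn]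
      simp only [pvWins, List.not_mem_nil, false_and, exists_false, or_false,
        List.take_of_length_le hn]
      rw [pv_mem_allPairs]
      constructor
      · rintro ⟨i, j, hij, hjn, rfl⟩
        exact ⟨i, j, hij, hjn, by omega, rfl⟩
      · rintro ⟨i, j, hij, hjn, _, rfl⟩
        exact ⟨i, j, hij, hjn, rfl⟩
    · have hn : wn < f.length := by omega
      have hchar := pvWins_char f wn h1 (f.drop wn) 0 (by rw [Nat.add_zero])
      have hiff : (p ∈ pvAllPairs (f.take wn) ∨
          ∃ W ∈ pvWins (f.take wn) (f.drop wn), p ∈ pvAllPairs W) ↔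
          ∃ u, u + wn ≤ f.length ∧ p ∈ pvAllPairs ((f.drop u).take wn) := by
        constructor
        · rintro (h | ⟨W, hW, hp⟩)
          · exact ⟨0, by omega, by simpa using h⟩
          · rw [show f.take wn = (f.drop 0).take wn by simp] at hW
            obtain ⟨u, hu1, hu2, rfl⟩ := (hchar W).mp hW
            exact ⟨u, hu2, hp⟩
        · rintro ⟨u, hu, hp⟩
          rcases Nat.eq_zero_or_pos u with rfl | hu0
          · exact Or.inl (by simpa using hp)
          · refine Or.inr ⟨(f.drop u).take wn, ?_, hp⟩
            rw [show f.take wn = (f.drop 0).take wn by simp]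
            exact (hchar _).mpr ⟨u, hu0, hu, rfl⟩
      rw [hiff]
      constructor
      · rintro ⟨u, hu, hp⟩
        rw [pv_mem_allPairs] at hp
        obtain ⟨i, j, hij, hjl, rfl⟩ := hp
        rw [pv_len_window] at hjl
        refine ⟨u + i, u + j, by omega, by omega, by omega, ?_⟩
        rw [pv_getD_window f u i wn (by omega) (by omega),
          pv_getD_window f u j wn (by omega) (by omega)]
      · rintro ⟨i, j, hij, hjn, hlt, rfl⟩
        have hjilt : j - i < wn := by omega
        refine ⟨min i (f.length - wn), by omega, ?_⟩
        rw [pv_mem_allPairs]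
        refine ⟨i - min i (f.length - wn), j - min i (f.length - wn), by omega, ?_, ?_⟩
        · rw [pv_len_window]; omega
        · rw [pv_getD_window f _ _ wn (by omega) (by omega),
            pv_getD_window f _ _ wn (by omega) (by omega)]
          congr 2 <;> omega

theorem pv_nodup_foldl_add {α β : Type} [BEq α] [LawfulBEq α] (l : List β) (g : β → α)
    (s : PySem.Set α) (hs : s.Nodup) :
    (l.foldl (fun s b => PySem.Set.add s (g b)) s).Nodup := by
  induction l generalizing s with
  | nil => exact hs
  | cons x l ih => exact ih _ (PySem.Set.nodup_add _ _ hs)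

theorem pv_nodup_loopB (f : List String) (w : Int) (l : List Int)
    (s : PySem.Set (String × String)) (hs : s.Nodup) :
    (l.foldl (fun pairs j =>
      (PySem.List.pyRange (max 0 (j - w + 1)) j).foldl
        (fun (pairs : PySem.Set (String × String)) i =>
          PySem.Set.add pairs (PySem.List.pyGetD f i "", PySem.List.pyGetD f j ""))
        pairs) s).Nodup := by
  induction l generalizing s with
  | nil => exact hs
  | cons j l ih => exact ih _ (pv_nodup_foldl_add _ _ _ hs)

theorem pv_mem_loopB (f : List String) (w : Int) (l : List Int)
    (s : PySem.Set (String × String)) (p : String × String) :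
    p ∈ l.foldl (fun pairs j =>
      (PySem.List.pyRange (max 0 (j - w + 1)) j).foldl
        (fun (pairs : PySem.Set (String × String)) i =>
          PySem.Set.add pairs (PySem.List.pyGetD f i "", PySem.List.pyGetD f j ""))
        pairs) s ↔
      p ∈ s ∨ ∃ j ∈ l, ∃ i : Int, max 0 (j - w + 1) ≤ i ∧ i < j ∧
        p = (PySem.List.pyGetD f i "", PySem.List.pyGetD f j "") := by
  induction l generalizing s with
  | nil => simp
  | cons j l ih =>
    simp only [List.foldl_cons]
    rw [ih, PySem.Set.mem_foldl_add]
    simp only [PySem.List.mem_pyRange_one, List.mem_cons]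
    constructor
    · rintro (⟨h | ⟨i, hi, rfl⟩⟩ | h)
      · exact Or.inl h
      · exact Or.inr ⟨j, Or.inl rfl, i, hi.1, hi.2, rfl⟩
      · obtain ⟨j', hj', rest⟩ := h
        exact Or.inr ⟨j', Or.inr hj', rest⟩
    · rintro (h | ⟨j', hj' | hj', i, h1, h2, rfl⟩)
      · exact Or.inl (Or.inl h)
      · subst hj'; exact Or.inl (Or.inr ⟨i, ⟨h1, h2⟩, rfl⟩)
      · exact Or.inr ⟨j', hj', i, h1, h2, rfl⟩

theorem pv_memB (f : List String) (w : Int) (hw : 0 ≤ w) (p : String × String) :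
    p ∈ ((PySem.List.pyRange 0 (f.length : Int)).foldl (fun pairs j =>
      (PySem.List.pyRange (max 0 (j - w + 1)) j).foldl
        (fun (pairs : PySem.Set (String × String)) i =>
          PySem.Set.add pairs (PySem.List.pyGetD f i "", PySem.List.pyGetD f j ""))
        pairs) PySem.Set.empty) ↔ pvGood f w p := by
  rw [pv_mem_loopB]
  simp only [PySem.List.mem_pyRange_one, PySem.Set.empty_eq, List.not_mem_nil, false_or]
  constructor
  · rintro ⟨j, ⟨hj0, hjn⟩, i, h1, h2, rfl⟩
    refine ⟨i.toNat, j.toNat, by omega, by omega, by omega, ?_⟩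
    rw [show i = (i.toNat : Int) by omega, show j = (j.toNat : Int) by omega,
      PySem.List.pyGetD_natCast, PySem.List.pyGetD_natCast]
    constructor
  · rintro ⟨i, j, hij, hjn, hw2, rfl⟩
    refine ⟨(j : Int), by omega, (i : Int), by omega, by omega,
      by rw [PySem.List.pyGetD_natCast, PySem.List.pyGetD_natCast]⟩

-- B's port returns [] for any negative window_size
theorem pv_alt_neg (f : List String) (w : Int) (hw : w < 0) :
    sliding_window_pairs_py_alt f w = [] := by
  unfold sliding_window_pairs_py_alt
  simp only
  rw [PySem.List.foldl_congr_mem _ _ (fun pairs _ => pairs) _ ?_, PySem.List.foldl_ignore]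
  · rfl
  · intro acc j _
    rw [show PySem.List.pyRange (max 0 (j - w + 1)) j = [] from
      List.eq_nil_of_length_eq_zero (by rw [PySem.List.length_pyRange_one]; omega)]
    rfl

-- A's first window under a negative window_size
theorem pv_win0_neg (f : List String) (w : Int) (hw : w < 0) :
    PySem.List.slice f none (some w) = f.take (f.length - (-w).toNat) := by
  have ht : ((-w).toNat : Int) = -w := Int.toNat_of_nonneg (by omega)
  obtain ⟨k, hk0, hkw⟩ : ∃ k : Nat, 0 < k ∧ w = -(k : Int) := ⟨(-w).toNat, by omega, by omega⟩
  rw [hkw, PySem.List.slice_to_neg_natCast f k hk0]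
  simp

-- A's pair set is empty whenever its first window has at most one element
theorem pv_A_short_win (f : List String) (w : Int)
    (hwin : (PySem.List.slice f none (some w)).length ≤ 1) :
    sliding_window_pairs_py f w = [] := by
  unfold sliding_window_pairs_py
  simp only
  rw [show ((PySem.List.slice f (some w) none).foldl pvStepA
      (PySem.Set.union PySem.Set.empty (pvAllPairs (PySem.List.slice f none (some w))),
       PySem.List.slice f none (some w))).1 = [] from List.eq_nil_iff_forall_not_mem.mpr ?_]
  · rfl
  · intro p hp
    rw [pv_mem_loopA] at hp
    rcases hp with hp | ⟨W, hW, hp⟩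
    · rw [PySem.Set.mem_union] at hp
      rcases hp with hp | hp
      · simp [PySem.Set.empty_eq] at hp
      · rw [pv_mem_allPairs] at hp
        obtain ⟨i, j, hij, hj, _⟩ := hp
        omega
    · rw [pv_mem_allPairs] at hp
      obtain ⟨i, j, hij, hj, _⟩ := hp
      have := pvWins_len _ _ _ hW
      omega

-- ===== VERDICT (by name: the statement is the Claim_ definition above) =====
theorem sliding_window_pairs_py_spec : Claim_unchanged_sliding_window_pairs_py := by
  intro f w _ hnd
  show sliding_window_pairs_py f w = sliding_window_pairs_py_alt f w
  rcases Int.lt_or_le w 0 with hw | hw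
  · -- negative window_size outside D_: both return []
    have hnw : (f.length : Int) + w < 2 := by
      by_contra h
      exact hnd ⟨hw, by omega⟩
    rw [pv_alt_neg f w hw, pv_A_short_win f w (by rw [pv_win0_neg f w hw]; simp; omega)]
  · unfold sliding_window_pairs_py sliding_window_pairs_py_alt
    simp only
    rw [pv_sorted2_eq_sorted, pv_sorted2_eq_sorted]
    apply PySem.List.sorted_eq_sorted_of_perm
    · intro a b hab
      have : ((a.1, a.2) : String × String) = (b.1, b.2) := toLex.injective hab
      exact Prod.ext (congrArg Prod.fst this) (congrArg Prod.snd this)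
    · refine (List.perm_ext_iff_of_nodup ?_ ?_).mpr ?_
      · exact pv_nodup_loopA _ _ _ (PySem.Set.nodup_union _ _ List.nodup_nil)
      · exact pv_nodup_loopB f w _ _ List.nodup_nil
      · intro p
        rw [pv_memA f w hw p, pv_memB f w hw p]

theorem sliding_window_pairs_py_changed : Claim_changed_sliding_window_pairs_py := by
  unfold Claim_changed_sliding_window_pairs_py
  refine ⟨by decide, by decide, ?_, by decide, by decide⟩
  show sliding_window_pairs_py ["a", "b", "c"] (-1) = [("a", "b"), ("b", "c")]
  unfold sliding_window_pairs_py
  simp only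
  rw [show ((PySem.List.slice ["a", "b", "c"] (some (-1)) none).foldl pvStepA
      (PySem.Set.union PySem.Set.empty (pvAllPairs (PySem.List.slice ["a", "b", "c"] none (some (-1)))),
       PySem.List.slice ["a", "b", "c"] none (some (-1)))).1 = [("a", "b"), ("b", "c")] from by decide]
  simp [PySem.List.sorted2, PySem.List.insertBy, String.lt_iff_toList_lt]
  decide

theorem sliding_window_pairs_py_tight : Claim_exact_sliding_window_pairs_py := by
  intro f w _ hd
  obtain ⟨hw, hn⟩ := hd
  rw [pv_alt_neg f w hw]
  intro hcontra
  -- A's set contains the pair of the first two elements of its first window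
  have hwin := pv_win0_neg f w hw
  have hlen : 2 ≤ (PySem.List.slice f none (some w)).length := by
    rw [hwin]; simp; omega
  have hmem : ((PySem.List.slice f none (some w)).getD 0 "",
      (PySem.List.slice f none (some w)).getD 1 "") ∈
      ((PySem.List.slice f (some w) none).foldl pvStepA
        (PySem.Set.union PySem.Set.empty (pvAllPairs (PySem.List.slice f none (some w))),
         PySem.List.slice f none (some w))).1 := by
    rw [pv_mem_loopA]
    exact Or.inl ((PySem.Set.mem_union _ _ _).mpr (Or.inr
      ((pv_mem_allPairs _ _).mpr ⟨0, 1, by omega, by omega, rfl⟩)))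
  unfold sliding_window_pairs_py at hcontra
  simp only at hcontra
  rw [pv_sorted2_eq_sorted, PySem.List.sorted_eq_nil_iff] at hcontra
  rw [hcontra] at hmem
  simp at hmem
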